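-- pv_equiv track=rewrite | github.com/Ascendral/KlomboAGI | klomboagi/reasoning/arc_dsl_v2.py | split_by_vertical_divider
-- ===== SOURCE A (Python) =====
-- from collections import Counter
--
-- Grid = list[list[int]]
--
-- def get_bg(grid: Grid) -> int:
--     """Most common color = background."""
--     flat = [c for row in grid for c in row]
--     return Counter(flat).most_common(1)[0][0] if flat else 0
--
-- def split_by_vertical_divider(grid: Grid) -> list[Grid]:
--     """Split grid at vertical divider lines (columns of single color)."""
--     bg = get_bg(grid)
--     rows, cols = len(grid), len(grid[0])
--     dividers = []
--     for c in range(cols):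
--         vals = set(grid[r][c] for r in range(rows))
--         if len(vals) == 1 and grid[0][c] != bg:
--             dividers.append(c)
--     if not dividers:
--         return [grid]
--     parts = []
--     prev = 0
--     for d in dividers:
--         if d > prev:
--             parts.append([row[prev:d] for row in grid])
--         prev = d + 1
--     if prev < cols:
--         parts.append([row[prev:] for row in grid])
--     return [p for p in parts if p]
-- ===== SOURCE B (Python) =====
-- from collections import Counter
--
--
-- def split_by_vertical_divider(grid):
--     """Split grid at vertical divider lines (columns of single color)."""
--     counts = Counter(c for row in grid for c in row)
--     bg = max(counts.items(), key=lambda kv: kv[1])[0] if counts else 0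
--     columns = [list(col) for col in zip(*grid)]
--     divider = [len(set(col)) == 1 and col[0] != bg for col in columns]
--     if True not in divider:
--         return [grid]
--     result, run = [], []
--     for col, d in zip(columns, divider):
--         if d:
--             if run:
--                 result.append([list(row) for row in zip(*run)])
--             run = []
--         else:
--             run.append(col)
--     if run:
--         result.append([list(row) for row in zip(*run)])
--     return result
-- ===== Notes on version B (the rewrite author's own statement) =====
-- stated objective: alternative
-- what changed: B transposes the grid into its list of columns, classifies each whole column as a divider, splits the column sequence into runs of consecutive non-divider columns with a flush-on-delimiter accumulator, and transposes each run back into rows; A instead collects divider column indices and slices every row between consecutive indices with a prev pointer.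
-- intended difference: On ragged grids whose rows extend beyond row 0's length and that have a divider column plus a trailing non-divider segment, A's last slice row[prev:] keeps the cells beyond the declared column count len(grid[0]) while B returns only the grid's declared columns, which is the intended reading of splitting a grid into sub-grids of its columns. — e.g. on split_by_vertical_divider([[1, 7, 2], [1, 7, 3, 9]]): A returns [[[1], [1]], [[2], [3, 9]]], B returns [[[1], [1]], [[2], [3]]]
import Mathlib
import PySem

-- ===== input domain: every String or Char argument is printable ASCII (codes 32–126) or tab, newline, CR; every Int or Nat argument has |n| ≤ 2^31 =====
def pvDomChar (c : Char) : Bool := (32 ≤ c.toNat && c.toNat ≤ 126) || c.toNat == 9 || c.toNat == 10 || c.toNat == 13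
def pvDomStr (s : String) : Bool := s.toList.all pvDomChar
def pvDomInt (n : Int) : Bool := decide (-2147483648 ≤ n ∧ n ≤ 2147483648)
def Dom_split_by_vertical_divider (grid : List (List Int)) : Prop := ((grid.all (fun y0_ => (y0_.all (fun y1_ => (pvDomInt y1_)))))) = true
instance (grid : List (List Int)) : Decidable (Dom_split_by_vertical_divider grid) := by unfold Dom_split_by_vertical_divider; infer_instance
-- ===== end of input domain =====

-- B splits the grid by transposing it into columns, flushing runs of non-divider columns at each
-- divider, and transposing each run back, instead of A's divider-index list + row slicing
-- (objective: alternative); on ragged grids with rows longer than row 0, B intentionally drops the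
-- cells beyond the column count that A's trailing slice keeps (see D_ below).


-- shared helper: first key of maximal count (Counter.most_common(1)[0][0] in A, max(items, key) in B);
-- only used on nonempty dicts
def pvMostCommonFst (d : PySem.Dict Int Int) : Int :=
  ((PySem.List.max? d.items (fun kv => kv.2)).map Prod.fst).getD 0

-- ===== PORT A =====
def get_bg (grid : List (List Int)) : Int :=
  let flat := grid.flatMap (fun row => row)
  if flat = [] then 0 else pvMostCommonFst (PySem.Dict.counter flat)

def split_by_vertical_divider (grid : List (List Int)) : List (List (List Int)) :=
  let bg := get_bg grid
  let rows := grid.length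
  let cols := (grid.headD []).length
  let dividers := (List.range cols).foldl (fun acc c =>
      let vals : PySem.Set Int :=
        PySem.Set.ofList ((List.range rows).map (fun r => (grid.getD r []).getD c 0))
      if vals.length = 1 ∧ (grid.headD []).getD c 0 ≠ bg then acc ++ [c] else acc) []
  if dividers = [] then [grid] else
    let st := dividers.foldl (fun (s : List (List (List Int)) × Nat) d =>
        if s.2 < d then
          (s.1 ++ [grid.map (fun row => PySem.List.slice row (some (s.2 : Int)) (some (d : Int)))], d + 1)
        else (s.1, d + 1)) ([], 0)
    let parts := if st.2 < cols then
        st.1 ++ [grid.map (fun row => PySem.List.slice row (some (st.2 : Int)) none)]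
      else st.1
    parts.filter (fun p => !p.isEmpty)

-- ===== PORT B =====
-- zip(*xss) (rows of tuples, re-listed): length = min of the lengths, row i = the i-th entries
def pvZipT (xss : List (List Int)) : List (List Int) :=
  if xss.isEmpty then []
  else (List.range (((xss.map List.length).min?).getD 0)).map (fun i => xss.map (fun l => l.getD i 0))

def split_by_vertical_divider_alt (grid : List (List Int)) : List (List (List Int)) :=
  let counts := PySem.Dict.counter (grid.flatMap (fun row => row))
  let bg := if counts.items ≠ [] then pvMostCommonFst counts else 0
  let columns := pvZipT grid
  let divider := columns.map (fun col =>
      decide ((PySem.Set.ofList col).length = 1) && !(col.headD 0 == bg))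
  if !(divider.contains true) then [grid]
  else
    let st := (columns.zip divider).foldl
      (fun (s : List (List (List Int)) × List (List Int)) cd =>
        if cd.2 then
          (if !s.2.isEmpty then s.1 ++ [pvZipT s.2] else s.1, [])
        else (s.1, s.2 ++ [cd.1])) ([], [])
    if !st.2.isEmpty then st.1 ++ [pvZipT st.2] else st.1

-- ===== PRECONDITION & SPEC =====
-- Pre_ is exactly the set of inputs on which A returns normally: A raises IndexError on the empty
-- grid (grid[0]) and whenever some row is shorter than row 0 (grid[r][c] for c < len(grid[0])).
def Pre_split_by_vertical_divider (grid : List (List Int)) : Prop :=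
  grid ≠ [] ∧ ∀ row ∈ grid, (grid.headD []).length ≤ row.length
instance (grid : List (List Int)) : Decidable (Pre_split_by_vertical_divider grid) := by
  unfold Pre_split_by_vertical_divider; infer_instance

def pvWitness_split_by_vertical_divider : List (List Int) := [[0, 7, 2], [0, 7, 5]]

-- the background colour (most common value, first insertion wins ties) and the divider-column test,
-- as conditions on the input (independent of both ports)
def pvBgD (grid : List (List Int)) : Int :=
  (PySem.List.max? (PySem.Set.ofList grid.flatten) (fun k => (grid.flatten.count k : Int))).getD 0

-- On ragged grids whose rows extend beyond row 0's length, with at least one divider column and a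
-- trailing segment, A's last slice row[prev:] keeps the cells beyond column count len(grid[0])
-- while B returns only the grid's declared columns, which is the intended reading of a column split.
-- a divider column: every row agrees with row 0 at index c, and that value is not the background
abbrev pvColHead (grid : List (List Int)) (c : Nat) : Option Int := grid[0]?.bind (fun r => r[c]?)

abbrev pvDivCol (grid : List (List Int)) (c : Nat) : Prop :=
  (∀ row ∈ grid, row[c]? = pvColHead grid c) ∧ ∀ v ∈ pvColHead grid c, v ≠ pvBgD grid

def D_split_by_vertical_divider (grid : List (List Int)) : Prop :=
  (∃ row ∈ grid, (grid.headD []).length < row.length) ∧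
  (∃ c < (grid.headD []).length, pvDivCol grid c) ∧
  ¬ pvDivCol grid ((grid.headD []).length - 1)
instance (grid : List (List Int)) : Decidable (D_split_by_vertical_divider grid) := by
  unfold D_split_by_vertical_divider; infer_instance

def Spec_split_by_vertical_divider (grid : List (List Int)) (out : List (List (List Int))) : Prop :=
  ¬ D_split_by_vertical_divider grid → out = split_by_vertical_divider_alt grid
instance (grid : List (List Int)) (out : List (List (List Int))) : Decidable (Spec_split_by_vertical_divider grid out) := by
  unfold Spec_split_by_vertical_divider; infer_instance

def pvDiffWitness_split_by_vertical_divider : List (List Int) := [[1, 7, 2], [1, 7, 3, 9]]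
def pvDiffWitnessOut_split_by_vertical_divider : (List (List (List Int))) × (List (List (List Int))) :=
  ([[[1], [1]], [[2], [3, 9]]], [[[1], [1]], [[2], [3]]])

-- ===== CLAIM (what is proved, stated in full; the proofs are below) =====
def Claim_unchanged_split_by_vertical_divider : Prop :=
  ∀ (grid : List (List Int)), Dom_split_by_vertical_divider grid →
    Pre_split_by_vertical_divider grid →
    Spec_split_by_vertical_divider grid (split_by_vertical_divider grid)

def Claim_changed_split_by_vertical_divider : Prop :=
  Dom_split_by_vertical_divider (pvDiffWitness_split_by_vertical_divider) ∧
  Pre_split_by_vertical_divider (pvDiffWitness_split_by_vertical_divider) ∧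
  D_split_by_vertical_divider (pvDiffWitness_split_by_vertical_divider) ∧
  split_by_vertical_divider (pvDiffWitness_split_by_vertical_divider) = pvDiffWitnessOut_split_by_vertical_divider.1 ∧
  split_by_vertical_divider_alt (pvDiffWitness_split_by_vertical_divider) = pvDiffWitnessOut_split_by_vertical_divider.2 ∧
  pvDiffWitnessOut_split_by_vertical_divider.1 ≠ pvDiffWitnessOut_split_by_vertical_divider.2

def Claim_exact_split_by_vertical_divider : Prop :=
  ∀ (grid : List (List Int)), Dom_split_by_vertical_divider grid →
    Pre_split_by_vertical_divider grid →
    D_split_by_vertical_divider grid →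
    split_by_vertical_divider grid ≠ split_by_vertical_divider_alt grid

-- ===== LEMMAS AND PROOFS =====

-- A's prev-loop, as a recursion over the divider list (with the trailing segment folded in)
def segsA (grid : List (List Int)) (n : Nat) : List Nat → Nat → List (List (List Int))
  | [], prev => if prev < n then [grid.map (fun row => PySem.List.slice row (some (prev : Int)) none)] else []
  | d :: t, prev =>
      if prev < d then
        grid.map (fun row => PySem.List.slice row (some (prev : Int)) (some (d : Int))) :: segsA grid n t (d + 1)
      else segsA grid n t (d + 1)

-- B's segments: identical except that the trailing segment stops at column n
def segsB (grid : List (List Int)) (n : Nat) : List Nat → Nat → List (List (List Int))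
  | [], prev => if prev < n then [grid.map (fun row => PySem.List.slice row (some (prev : Int)) (some (n : Int)))] else []
  | d :: t, prev =>
      if prev < d then
        grid.map (fun row => PySem.List.slice row (some (prev : Int)) (some (d : Int))) :: segsB grid n t (d + 1)
      else segsB grid n t (d + 1)

-- A's prev-loop without the trailing segment, plus the final prev value
def partsA (grid : List (List Int)) : List Nat → Nat → List (List (List Int))
  | [], _ => []
  | d :: t, prev =>
      if prev < d then
        grid.map (fun row => PySem.List.slice row (some (prev : Int)) (some (d : Int))) :: partsA grid t (d + 1)
      else partsA grid t (d + 1)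

def finalPrev : List Nat → Nat → Nat
  | [], prev => prev
  | d :: t, _ => finalPrev t (d + 1)

lemma foldA_eq (grid : List (List Int)) (ds : List Nat) (acc : List (List (List Int))) (prev : Nat) :
    ds.foldl (fun (s : List (List (List Int)) × Nat) d =>
        if s.2 < d then
          (s.1 ++ [grid.map (fun row => PySem.List.slice row (some (s.2 : Int)) (some (d : Int)))], d + 1)
        else (s.1, d + 1)) (acc, prev)
      = (acc ++ partsA grid ds prev, finalPrev ds prev) := by
  induction ds generalizing acc prev with
  | nil => simp [partsA, finalPrev]
  | cons d t ih =>
      simp only [List.foldl_cons, partsA, finalPrev]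
      by_cases h : prev < d
      · simp [h, ih]
      · simp [h, ih]

lemma setAdd_length_mono (t : List Int) : ∀ (s : PySem.Set Int), s.length ≤ (t.foldl PySem.Set.add s).length := by
  induction t with
  | nil => intro s; simp
  | cons x t ih =>
      intro s
      refine le_trans ?_ (ih (PySem.Set.add s x))
      simp [PySem.Set.add]
      split <;> simp

lemma setAdd_mem_mono (t : List Int) : ∀ (s : PySem.Set Int) (x : Int), x ∈ s → x ∈ t.foldl PySem.Set.add s := by
  induction t with
  | nil => intro s x h; simpa using h
  | cons y t ih =>
      intro s x h
      exact ih _ _ (by rw [PySem.Set.mem_add]; exact Or.inl h)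

lemma foldl_add_eq_self_iff (t : List Int) : ∀ (s : PySem.Set Int), t.foldl PySem.Set.add s = s ↔ ∀ x ∈ t, x ∈ s := by
  induction t with
  | nil => intro s; simp
  | cons x t ih =>
      intro s
      by_cases h : x ∈ s
      · have : PySem.Set.add s x = s := by simp [PySem.Set.add, h]
        simp [ih, h]
      · have hne : PySem.Set.add s x = s ++ [x] := by simp [PySem.Set.add, h]
        constructor
        · intro heq
          exfalso
          have h1 := setAdd_length_mono t (PySem.Set.add s x)
          rw [List.foldl_cons] at heq
          rw [heq, hne] at h1
          simp at h1
        · intro hall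
          exact absurd (hall x (by simp)) h

lemma ofList_len_one_iff (a : Int) (t : List Int) :
    (PySem.Set.ofList (a :: t)).length = 1 ↔ t.all (· == a) := by
  have hof : PySem.Set.ofList (a :: t) = t.foldl PySem.Set.add [a] := by
    rw [PySem.Set.ofList_eq_foldl]; rfl
  constructor
  · intro h
    have hmem : a ∈ t.foldl PySem.Set.add [a] := setAdd_mem_mono t [a] a (by simp)
    rw [hof] at h
    have : t.foldl PySem.Set.add [a] = [a] := by
      rcases hlist : t.foldl PySem.Set.add ([a] : PySem.Set Int) with _ | ⟨b, rest⟩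
      · rw [hlist] at h; simp at h
      · rw [hlist] at h hmem
        simp at h
        simp [h] at hmem
        simp [hmem, h]
    have := (foldl_add_eq_self_iff t [a]).mp this
    simp only [List.all_eq_true]
    intro x hx
    simpa using this x hx
  · intro h
    rw [hof, (foldl_add_eq_self_iff t [a]).mpr (by intro x hx; simpa using (by simpa using List.all_eq_true.mp h x hx : x = a))]
    rfl

lemma map_range_getD {β : Type} (f : List Int → β) : ∀ (grid : List (List Int)),
    (List.range grid.length).map (fun r => f (grid.getD r [])) = grid.map f := by
  intro grid
  induction grid with
  | nil => simp
  | cons g gs ih =>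
      simp only [List.length_cons, List.range_succ_eq_map, List.map_cons, List.map_map]
      refine congrArg₂ List.cons rfl ?_
      rw [← ih]
      apply List.map_congr_left
      intro r _
      rfl

lemma ofList_nil_iff (xs : List Int) : PySem.Set.ofList xs = [] ↔ xs = [] := by
  constructor
  · intro h
    cases xs with
    | nil => rfl
    | cons x t =>
        exfalso
        have : x ∈ PySem.Set.ofList (x :: t) := by simp [PySem.Set.mem_ofList]
        rw [h] at this
        simp at this
  · intro h; simp [h]

-- the divider predicate both ports compute on column c, with the background as a parameter
def pvIsDiv (grid : List (List Int)) (bg : Int) (c : Nat) : Bool :=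
  !((grid.headD []).getD c 0 == bg) && grid.all (fun row => row.getD c 0 == (grid.headD []).getD c 0)

lemma pred_bridge2 (grid : List (List Int)) (hg : grid ≠ []) (bg : Int) (c : Nat) :
    (decide ((PySem.Set.ofList ((List.range grid.length).map (fun r => (grid.getD r []).getD c 0))).length = 1
        ∧ (grid.headD []).getD c 0 ≠ bg))
      = pvIsDiv grid bg c := by
  obtain ⟨r0, rest, rfl⟩ : ∃ r0 rest, grid = r0 :: rest := by
    cases grid with
    | nil => exact absurd rfl hg
    | cons a b => exact ⟨a, b, rfl⟩
  rw [map_range_getD (fun row => row.getD c 0) (r0 :: rest)]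
  simp only [pvIsDiv, List.headD_cons, List.map_cons, List.all_cons, BEq.rfl, Bool.true_and]
  rw [Bool.decide_and,
      show (decide ((PySem.Set.ofList (r0.getD c 0 :: rest.map (fun row => row.getD c 0))).length = 1))
          = (rest.map (fun row => row.getD c 0)).all (· == r0.getD c 0) from by
        rw [Bool.eq_iff_iff]; simp only [decide_eq_true_eq]; exact ofList_len_one_iff _ _,
      List.all_map, Bool.and_comm]
  congr 1
  rw [Bool.eq_iff_iff]
  simp

lemma segsA_eq_parts (grid : List (List Int)) (n : Nat) : ∀ (ds : List Nat) (prev : Nat),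
    segsA grid n ds prev = partsA grid ds prev
      ++ (if finalPrev ds prev < n then [grid.map (fun row => PySem.List.slice row (some ((finalPrev ds prev : Nat) : Int)) none)] else []) := by
  intro ds
  induction ds with
  | nil => intro prev; simp [segsA, partsA, finalPrev]
  | cons d t ih =>
      intro prev
      simp only [segsA, partsA, finalPrev]
      by_cases h : prev < d
      · simp [h, ih]
      · simp [h, ih]

lemma segsB_eq_parts (grid : List (List Int)) (n : Nat) : ∀ (ds : List Nat) (prev : Nat),
    segsB grid n ds prev = partsA grid ds prev
      ++ (if finalPrev ds prev < n then [grid.map (fun row => PySem.List.slice row (some ((finalPrev ds prev : Nat) : Int)) (some (n : Int)))] else []) := by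
  intro ds
  induction ds with
  | nil => intro prev; simp [segsB, partsA, finalPrev]
  | cons d t ih =>
      intro prev
      simp only [segsB, partsA, finalPrev]
      by_cases h : prev < d
      · simp [h, ih]
      · simp [h, ih]

lemma segsA_ne_nil (grid : List (List Int)) (hg : grid ≠ []) (n : Nat) : ∀ (ds : List Nat) (prev : Nat),
    ∀ x ∈ segsA grid n ds prev, x ≠ [] := by
  intro ds
  induction ds with
  | nil =>
      intro prev x hx
      simp only [segsA] at hx
      split at hx
      · simp at hx
        simp [hx, hg]
      · simp at hx
  | cons d t ih =>
      intro prev x hx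
      simp only [segsA] at hx
      split at hx
      · rcases List.mem_cons.mp hx with h | h
        · simp [h, hg]
        · exact ih _ x h
      · exact ih _ x hx

lemma portA_eq (grid : List (List Int)) (hg : grid ≠ []) :
    split_by_vertical_divider grid =
      (if ((List.range (grid.headD []).length).filter (pvIsDiv grid (get_bg grid))) = [] then [grid]
       else segsA grid (grid.headD []).length
              ((List.range (grid.headD []).length).filter (pvIsDiv grid (get_bg grid))) 0) := by
  simp only [split_by_vertical_divider]
  rw [PySem.List.foldl_append_ite_eq_filter]
  rw [List.filter_congr (fun c _ => pred_bridge2 grid hg (get_bg grid) c)]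
  simp only [List.nil_append]
  by_cases hdv : ((List.range (grid.headD []).length).filter (pvIsDiv grid (get_bg grid))) = []
  · rw [if_pos hdv, if_pos hdv]
  · rw [if_neg hdv, if_neg hdv]
    rw [foldA_eq]
    simp only [List.nil_append]
    rw [show (if finalPrev ((List.range (grid.headD []).length).filter (pvIsDiv grid (get_bg grid))) 0 < (grid.headD []).length
              then partsA grid ((List.range (grid.headD []).length).filter (pvIsDiv grid (get_bg grid))) 0
                    ++ [grid.map (fun row => PySem.List.slice row (some ((finalPrev ((List.range (grid.headD []).length).filter (pvIsDiv grid (get_bg grid))) 0 : Nat) : Int)) none)]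
              else partsA grid ((List.range (grid.headD []).length).filter (pvIsDiv grid (get_bg grid))) 0)
          = partsA grid ((List.range (grid.headD []).length).filter (pvIsDiv grid (get_bg grid))) 0
              ++ (if finalPrev ((List.range (grid.headD []).length).filter (pvIsDiv grid (get_bg grid))) 0 < (grid.headD []).length
                  then [grid.map (fun row => PySem.List.slice row (some ((finalPrev ((List.range (grid.headD []).length).filter (pvIsDiv grid (get_bg grid))) 0 : Nat) : Int)) none)]
                  else []) from by split_ifs <;> simp]
    rw [← segsA_eq_parts grid (grid.headD []).length]
    rw [List.filter_eq_self.mpr]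
    intro x hx
    simpa using segsA_ne_nil grid hg _ _ _ x hx

-- ===== B-side lemmas =====

-- column c of the grid
def colAt (grid : List (List Int)) (c : Nat) : List Int := grid.map (fun row => row.getD c 0)

lemma foldl_min_const (l : List Nat) (n : Nat) (h : ∀ x ∈ l, n ≤ x) : l.foldl min n = n := by
  induction l with
  | nil => rfl
  | cons x t ih =>
      rw [List.foldl_cons, min_eq_left (h x (by simp))]
      exact ih (fun y hy => h y (by simp [hy]))

lemma min?_head (x : Nat) (t : List Nat) (h : ∀ y ∈ t, x ≤ y) :
    (x :: t).min? = some x := by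
  rw [List.min?_cons']
  exact congrArg some (foldl_min_const t x h)

lemma getD_map_getD (grid : List (List Int)) (f : List Int → Int) (i : Nat) (hi : i < grid.length) :
    (grid.map f).getD i 0 = f (grid.getD i []) := by
  rw [List.getD_eq_getElem?_getD, List.getD_eq_getElem?_getD, List.getElem?_map]
  rw [List.getElem?_eq_getElem hi]
  rfl

-- zip(*run) of the columns [prev, prev+k) is the row slices, on a nonempty grid whose rows all
-- have at least n entries
lemma zipT_run (grid : List (List Int)) (n : Nat) (_hg : grid ≠ [])
    (hrect : ∀ row ∈ grid, n ≤ row.length) (prev k : Nat) (hk : 0 < k) (hle : prev + k ≤ n) :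
    pvZipT ((List.range' prev k).map (colAt grid)) = grid.map (fun row => (row.drop prev).take k) := by
  have hm : ∀ c, (colAt grid c).length = grid.length := by intro c; simp [colAt]
  have hne : (List.range' prev k).map (colAt grid) ≠ [] := by
    simp [List.range'_eq_nil_iff]; omega
  have hmin : (((List.range' prev k).map (colAt grid)).map List.length).min? = some grid.length := by
    rcases hr : ((List.range' prev k).map (colAt grid)).map List.length with _ | ⟨x, t⟩
    · exfalso; apply hne; simpa using hr
    · have hx : ∀ y ∈ x :: t, y = grid.length := by
        intro y hy
        rw [← hr] at hy
        simp only [List.map_map, List.mem_map] at hy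
        obtain ⟨c, _, rfl⟩ := hy
        exact hm c
      rw [min?_head x t (fun y hy => le_of_eq ((hx x (by simp)).trans (hx y (by simp [hy])).symm)),
          hx x (by simp)]
  rw [pvZipT, if_neg (by simpa using hne), hmin]
  simp only [Option.getD_some]
  rw [show (fun i => ((List.range' prev k).map (colAt grid)).map (fun l => l.getD i 0))
        = (fun i => (List.range' prev k).map (fun c => (colAt grid c).getD i 0)) from by
      funext i; rw [List.map_map]; rfl]
  have hstep : (List.range grid.length).map
        (fun i => (List.range' prev k).map (fun c => (colAt grid c).getD i 0))
      = (List.range grid.length).map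
        (fun i => (List.range' prev k).map (fun c => (grid.getD i []).getD c 0)) := by
    apply List.map_congr_left
    intro i hi
    apply List.map_congr_left
    intro c _
    exact getD_map_getD grid (fun row => row.getD c 0) i (by simpa using hi)
  rw [hstep, map_range_getD (fun row => (List.range' prev k).map (fun c => row.getD c 0)) grid]
  apply List.map_congr_left
  intro row hrow
  have hlen : n ≤ row.length := hrect row hrow
  apply List.ext_getElem
  · simp; omega
  · intro i h1 h2
    simp only [List.getElem_map, List.getElem_range', List.getElem_take, List.getElem_drop,
      List.getD_eq_getElem?_getD, one_mul]
    have : prev + i < row.length := by simp at h1 h2 ⊢; omega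
    rw [List.getElem?_eq_getElem this]
    rfl

-- the current run: columns [prev, s)
def runCols (grid : List (List Int)) (prev s : Nat) : List (List Int) :=
  (List.range' prev (s - prev)).map (colAt grid)

-- flush the pending run at the end of B's loop
def postB (s : List (List (List Int)) × List (List Int)) : List (List (List Int)) :=
  if !s.2.isEmpty then s.1 ++ [pvZipT s.2] else s.1

-- one step of B's left-to-right sweep
def stepB (grid : List (List Int)) (bg : Int)
    (s : List (List (List Int)) × List (List Int)) (c : Nat) : List (List (List Int)) × List (List Int) :=
  if pvIsDiv grid bg c then
    (if !s.2.isEmpty then s.1 ++ [pvZipT s.2] else s.1, [])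
  else (s.1, s.2 ++ [colAt grid c])

lemma runCols_nil (grid : List (List Int)) (s : Nat) : runCols grid s s = [] := by
  simp [runCols]

lemma runCols_snoc (grid : List (List Int)) (prev s : Nat) (h : prev ≤ s) :
    runCols grid prev s ++ [colAt grid s] = runCols grid prev (s + 1) := by
  simp only [runCols]
  rw [show s + 1 - prev = (s - prev) + 1 from by omega, List.range'_1_concat,
      show prev + (s - prev) = s from by omega, List.map_append]
  rfl

lemma runCols_flush (grid : List (List Int)) (n : Nat) (hg : grid ≠ [])
    (hrect : ∀ row ∈ grid, n ≤ row.length) (prev s : Nat) (hps : prev < s) (hsn : s ≤ n) :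
    pvZipT (runCols grid prev s) = grid.map (fun row => PySem.List.slice row (some (prev : Int)) (some (s : Int))) := by
  rw [runCols, zipT_run grid n hg hrect prev (s - prev) (by omega) (by omega)]
  apply List.map_congr_left
  intro row _
  rw [PySem.List.slice_natCast]

lemma runCols_ne_nil_iff (grid : List (List Int)) (prev s : Nat) :
    (runCols grid prev s).isEmpty = false ↔ prev < s := by
  simp [runCols, List.isEmpty_eq_false_iff, List.range'_eq_nil_iff]
  omega

-- the main loop invariant: B's flush loop over columns [s, s+k) produces the segments segsB
lemma masterB (grid : List (List Int)) (bg : Int) (n : Nat) (hg : grid ≠ [])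
    (hrect : ∀ row ∈ grid, n ≤ row.length) :
    ∀ (k s prev : Nat) (acc : List (List (List Int))), prev ≤ s → s + k = n →
    postB ((List.range' s k).foldl (stepB grid bg) (acc, runCols grid prev s))
      = acc ++ segsB grid n ((List.range' s k).filter (pvIsDiv grid bg)) prev := by
  intro k
  induction k with
  | zero =>
      intro s prev acc hps hsk
      have hsn : s = n := by omega
      subst hsn
      simp only [List.range', List.foldl_nil, List.filter_nil, segsB, postB]
      by_cases h : prev < s
      · rw [(runCols_ne_nil_iff grid prev s).mpr h, if_pos h,
            runCols_flush grid s hg hrect prev s h (le_refl s)]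
        simp
      · have hpe : prev = s := by omega
        subst hpe
        simp [runCols_nil]
  | succ k ih =>
      intro s prev acc hps hsk
      rw [List.range'_succ, List.filter_cons, List.foldl_cons]
      by_cases h : pvIsDiv grid bg s
      · rw [if_pos h]
        simp only [stepB, if_pos h, segsB]
        by_cases hps' : prev < s
        · rw [(runCols_ne_nil_iff grid prev s).mpr hps']
          simp only [Bool.not_false, if_true, if_pos hps']
          rw [show ([] : List (List Int)) = runCols grid (s+1) (s+1) from (runCols_nil grid (s+1)).symm]
          rw [ih (s+1) (s+1) _ (le_refl _) (by omega)]
          rw [runCols_flush grid n hg hrect prev s hps' (by omega)]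
          simp
        · have hpe : prev = s := by omega
          subst hpe
          simp only [runCols_nil, List.isEmpty_nil, Bool.not_true, Bool.false_eq_true, if_false]
          rw [show ([] : List (List Int)) = runCols grid (prev+1) (prev+1) from (runCols_nil grid (prev+1)).symm]
          rw [ih (prev+1) (prev+1) _ (le_refl _) (by omega)]
          rw [if_neg (by omega)]
      · rw [if_neg h]
        simp only [stepB, if_neg h]
        rw [runCols_snoc grid prev s hps]
        exact ih (s+1) prev acc (by omega) (by omega)

-- B's columns are the colAt list, on a nonempty grid whose shortest row is row 0
lemma columns_eq (grid : List (List Int)) (hg : grid ≠ [])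
    (hmin : ∀ row ∈ grid, (grid.headD []).length ≤ row.length) :
    pvZipT grid = (List.range (grid.headD []).length).map (colAt grid) := by
  rw [pvZipT, if_neg (by simpa using hg)]
  have hmin' : (grid.map List.length).min? = some (grid.headD []).length := by
    obtain ⟨r0, rest, rfl⟩ : ∃ r0 rest, grid = r0 :: rest := by
      cases grid with
      | nil => exact absurd rfl hg
      | cons a b => exact ⟨a, b, rfl⟩
    simp only [List.map_cons, List.headD_cons]
    apply min?_head
    intro y hy
    simp only [List.mem_map] at hy
    obtain ⟨row, hrow, rfl⟩ := hy
    simpa using hmin row (by simp [hrow])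
  rw [hmin']
  rfl

-- B's per-column flag is pvIsDiv, on a nonempty grid
lemma flag_eq (grid : List (List Int)) (bg : Int) (hg : grid ≠ []) (c : Nat) :
    (decide ((PySem.Set.ofList (colAt grid c)).length = 1) && !((colAt grid c).headD 0 == bg))
      = pvIsDiv grid bg c := by
  rw [← pred_bridge2 grid hg bg c, map_range_getD (fun row => row.getD c 0) grid]
  obtain ⟨r0, rest, rfl⟩ : ∃ r0 rest, grid = r0 :: rest := by
    cases grid with
    | nil => exact absurd rfl hg
    | cons a b => exact ⟨a, b, rfl⟩
  simp only [colAt, List.map_cons, List.headD_cons, Bool.decide_and]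
  congr 1
  rw [Bool.eq_iff_iff]
  simp

-- max? of a mapped list, for relating the two bg computations
lemma max?_map' {α β κ : Type} [LT κ] [DecidableLT κ] (f : α → β) (key : β → κ) :
    ∀ (l : List α) (acc : Option α),
    ((l.map f).foldl (fun acc x =>
        match acc with
        | none => some x
        | some m => if key m < key x then some x else some m) (acc.map f))
      = Option.map f (l.foldl (fun acc x =>
        match acc with
        | none => some x
        | some m => if key (f m) < key (f x) then some x else some m) acc) := by
  intro l
  induction l with
  | nil => intro acc; simp
  | cons x t ih =>
      intro acc
      rw [List.map_cons, List.foldl_cons, List.foldl_cons]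
      cases acc with
      | none => simpa using ih (some x)
      | some m =>
          simp only [Option.map_some]
          by_cases h : key (f m) < key (f x)
          · rw [if_pos h, if_pos h]; exact ih (some x)
          · rw [if_neg h, if_neg h]; exact ih (some m)

lemma pymax_map {α β κ : Type} [LT κ] [DecidableLT κ] (f : α → β) (key : β → κ) (l : List α) :
    PySem.List.max? (l.map f) key = Option.map f (PySem.List.max? l (fun x => key (f x))) := by
  unfold PySem.List.max?
  simpa using max?_map' f key l none

-- the D_ background equals A's get_bg
lemma bgD_eq (grid : List (List Int)) : pvBgD grid = get_bg grid := by
  have hflat : grid.flatMap (fun row => row) = grid.flatten := by simp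
  simp only [get_bg, hflat, pvBgD]
  by_cases h : grid.flatten = []
  · simp [h, PySem.List.max?]
  · rw [if_neg h]
    simp only [pvMostCommonFst, PySem.Dict.items_counter]
    rw [pymax_map (fun k => (k, (grid.flatten.count k : Int))) (fun kv => kv.2)
          (PySem.Set.ofList grid.flatten)]
    rw [show (fun x => ((fun k => ((k, (grid.flatten.count k : Int)) : Int × Int)) x).2)
          = (fun k => (grid.flatten.count k : Int)) from rfl]
    cases hm : PySem.List.max? (PySem.Set.ofList grid.flatten) (fun k => (grid.flatten.count k : Int)) with
    | none => simp
    | some m => simp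

lemma divProp_iff (grid : List (List Int)) (hg : grid ≠ [])
    (hmin : ∀ row ∈ grid, (grid.headD []).length ≤ row.length)
    (c : Nat) (hc : c < (grid.headD []).length) :
    pvDivCol grid c ↔ pvIsDiv grid (get_bg grid) c = true := by
  rw [← bgD_eq]
  obtain ⟨r0, rest, rfl⟩ : ∃ r0 rest, grid = r0 :: rest := by
    cases grid with
    | nil => exact absurd rfl hg
    | cons a b => exact ⟨a, b, rfl⟩
  simp only [List.headD_cons] at hc hmin
  have hhead : pvColHead (r0 :: rest) c = some (r0.getD c 0) := by
    simp [pvColHead, List.getD_eq_getElem?_getD, List.getElem?_eq_getElem hc]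
  have hrowc : ∀ row ∈ r0 :: rest, row[c]? = some (row.getD c 0) := by
    intro row hrow
    have : c < row.length := lt_of_lt_of_le hc (hmin row hrow)
    simp [List.getElem?_eq_getElem this, List.getD_eq_getElem?_getD]
  constructor
  · rintro ⟨hall, hne⟩
    simp only [pvIsDiv, Bool.and_eq_true, List.all_eq_true, Bool.not_eq_eq_eq_not,
      Bool.not_true, beq_eq_false_iff_ne, beq_iff_eq, List.headD_cons]
    refine ⟨?_, ?_⟩
    · exact hne _ (by rw [hhead]; rfl)
    · intro row hrow
      have := hall row hrow
      rw [hrowc row hrow, hhead] at this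
      exact Option.some_injective _ this
  · intro hdiv
    simp only [pvIsDiv, Bool.and_eq_true, List.all_eq_true, Bool.not_eq_eq_eq_not,
      Bool.not_true, beq_eq_false_iff_ne, beq_iff_eq, List.headD_cons] at hdiv
    refine ⟨?_, ?_⟩
    · intro row hrow
      rw [hrowc row hrow, hhead, hdiv.2 row hrow]
    · intro v hv
      rw [hhead] at hv
      simp only [Option.mem_def, Option.some.injEq] at hv
      exact hv ▸ hdiv.1

-- B, rewritten as segsB over the divider indices (nonempty grid, row 0 shortest)
lemma portB_eq (grid : List (List Int)) (hg : grid ≠ [])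
    (hmin : ∀ row ∈ grid, (grid.headD []).length ≤ row.length) :
    split_by_vertical_divider_alt grid =
      (if ((List.range (grid.headD []).length).filter (pvIsDiv grid (get_bg grid))) = [] then [grid]
       else segsB grid (grid.headD []).length
              ((List.range (grid.headD []).length).filter (pvIsDiv grid (get_bg grid))) 0) := by
  simp only [split_by_vertical_divider_alt]
  have hiff : (PySem.Dict.counter (grid.flatMap (fun row => row))).items = [] ↔ grid.flatMap (fun row => row) = [] := by
    rw [PySem.Dict.items_counter]
    simp only [List.map_eq_nil_iff]
    exact ofList_nil_iff _
  have hbg : (if (PySem.Dict.counter (grid.flatMap (fun row => row))).items ≠ [] then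
        pvMostCommonFst (PySem.Dict.counter (grid.flatMap (fun row => row))) else 0) = get_bg grid := by
    simp only [get_bg]
    by_cases h : grid.flatMap (fun row => row) = []
    · rw [if_neg (not_not_intro (hiff.mpr h)), if_pos h]
    · rw [if_pos (fun he => h (hiff.mp he)), if_neg h]
  rw [hbg, columns_eq grid hg hmin]
  rw [show ((List.range (grid.headD []).length).map (colAt grid)).map (fun col =>
        decide ((PySem.Set.ofList col).length = 1) && !(col.headD 0 == get_bg grid))
      = (List.range (grid.headD []).length).map (pvIsDiv grid (get_bg grid)) from by
    rw [List.map_map]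
    exact List.map_congr_left (fun c _ => flag_eq grid (get_bg grid) hg c)]
  rw [List.zip_map', List.foldl_map]
  by_cases hdv : ((List.range (grid.headD []).length).filter (pvIsDiv grid (get_bg grid))) = []
  · rw [if_pos hdv]
    rw [if_pos (by
      simp only [Bool.not_eq_eq_eq_not, Bool.not_true, List.contains_eq_mem, decide_eq_false_iff_not]
      intro hmem
      simp only [List.mem_map] at hmem
      obtain ⟨c, hc, hflag⟩ := hmem
      have : c ∈ (List.range (grid.headD []).length).filter (pvIsDiv grid (get_bg grid)) := by
        rw [List.mem_filter]; exact ⟨hc, hflag.symm ▸ rfl⟩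
      rw [hdv] at this; simp at this)]
  · rw [if_neg hdv]
    rw [if_neg (by
      simp only [Bool.not_eq_eq_eq_not, Bool.not_true, List.contains_eq_mem, decide_eq_false_iff_not, not_not]
      obtain ⟨c, hc⟩ := List.exists_mem_of_ne_nil _ hdv
      rw [List.mem_filter] at hc
      exact List.mem_map.mpr ⟨c, hc.1, hc.2⟩)]
    have hmaster := masterB grid (get_bg grid) (grid.headD []).length hg hmin
      (grid.headD []).length 0 0 [] (le_refl 0) (by omega)
    rw [runCols_nil] at hmaster
    rw [List.range_eq_range'] at *
    rw [show (fun (s : List (List (List Int)) × List (List Int)) (c : Nat) =>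
          if pvIsDiv grid (get_bg grid) c then
            (if !s.2.isEmpty then s.1 ++ [pvZipT s.2] else s.1, ([] : List (List Int)))
          else (s.1, s.2 ++ [colAt grid c])) = stepB grid (get_bg grid) from by
      funext s c; simp [stepB, colAt]]
    rw [show (if !((List.range' 0 (grid.headD []).length).foldl (stepB grid (get_bg grid)) ([], [])).2.isEmpty then
          ((List.range' 0 (grid.headD []).length).foldl (stepB grid (get_bg grid)) ([], [])).1 ++ [pvZipT ((List.range' 0 (grid.headD []).length).foldl (stepB grid (get_bg grid)) ([], [])).2]
        else ((List.range' 0 (grid.headD []).length).foldl (stepB grid (get_bg grid)) ([], [])).1)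
        = postB ((List.range' 0 (grid.headD []).length).foldl (stepB grid (get_bg grid)) ([], [])) from rfl]
    rw [hmaster, List.nil_append]

-- segsA = segsB on exactly-rectangular grids
lemma segsA_eq_segsB_rect (grid : List (List Int)) (n : Nat)
    (hrect : ∀ row ∈ grid, row.length = n) : ∀ (ds : List Nat) (prev : Nat),
    segsA grid n ds prev = segsB grid n ds prev := by
  intro ds
  induction ds with
  | nil =>
      intro prev
      simp only [segsA, segsB]
      split_ifs with h
      · refine congrArg (fun x => [x]) (List.map_congr_left ?_)
        intro row hrow
        rw [PySem.List.slice_from_natCast, PySem.List.slice_natCast,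
            List.take_of_length_le (by simp [hrect row hrow])]
      · rfl
  | cons d t ih =>
      intro prev
      simp only [segsA, segsB]
      split_ifs with h
      · rw [ih]
      · rw [ih]

-- segsA = segsB when the final prev reaches n (no trailing segment)
lemma segsA_eq_segsB_fp (grid : List (List Int)) (n : Nat) : ∀ (ds : List Nat) (prev : Nat),
    n ≤ finalPrev ds prev → segsA grid n ds prev = segsB grid n ds prev := by
  intro ds
  induction ds with
  | nil =>
      intro prev h
      simp only [segsA, segsB, finalPrev] at *
      rw [if_neg (by omega), if_neg (by omega)]
  | cons d t ih =>
      intro prev h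
      simp only [segsA, segsB, finalPrev] at *
      split_ifs with hpd
      · rw [ih (d+1) h]
      · rw [ih (d+1) h]

lemma finalPrev_last (d : Nat) : ∀ (ds : List Nat) (prev : Nat), finalPrev (ds ++ [d]) prev = d + 1 := by
  intro ds
  induction ds with
  | nil => intro prev; rfl
  | cons e t ih => intro prev; simpa [finalPrev] using ih (e + 1)

lemma finalPrev_le (m : Nat) : ∀ (ds : List Nat) (prev : Nat),
    (∀ d ∈ ds, d + 1 ≤ m) → prev ≤ m → finalPrev ds prev ≤ m := by
  intro ds
  induction ds with
  | nil => intro prev _ h; exact h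
  | cons d t ih =>
      intro prev hall hp
      exact ih (d + 1) (fun e he => hall e (by simp [he])) (hall d (by simp))

theorem split_by_vertical_divider_spec : Claim_unchanged_split_by_vertical_divider := by
  unfold Claim_unchanged_split_by_vertical_divider
  intro grid _ hpre
  obtain ⟨hg, hmin⟩ := hpre
  unfold Spec_split_by_vertical_divider
  intro hnd
  rw [portA_eq grid hg, portB_eq grid hg hmin]
  by_cases hdv : ((List.range (grid.headD []).length).filter (pvIsDiv grid (get_bg grid))) = []
  · rw [if_pos hdv, if_pos hdv]
  · rw [if_neg hdv, if_neg hdv]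
    obtain ⟨c, hc⟩ := List.exists_mem_of_ne_nil _ hdv
    rw [List.mem_filter, List.mem_range] at hc
    by_cases hlast : pvIsDiv grid (get_bg grid) ((grid.headD []).length - 1) = true
    · -- the last column is a divider, so the divider list ends with n-1 and finalPrev = n
      have hn0 : 0 < (grid.headD []).length := by omega
      apply segsA_eq_segsB_fp
      rw [show (List.range (grid.headD []).length)
            = List.range ((grid.headD []).length - 1) ++ [(grid.headD []).length - 1] from by
          rw [← List.range_succ]; congr 1; omega]
      rw [List.filter_append, List.filter_cons, if_pos (by simpa using hlast), List.filter_nil]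
      rw [finalPrev_last]
      omega
    · by_cases hlong : ∃ row ∈ grid, (grid.headD []).length < row.length
      · -- some row is longer, dividers exist and the last column is not one: that is exactly D_
        exact absurd ⟨hlong, ⟨c, hc.1, (divProp_iff grid hg hmin c hc.1).mpr hc.2⟩,
          fun hp => hlast ((divProp_iff grid hg hmin _ (by omega)).mp hp)⟩ hnd
      · -- all rows have exactly row 0's length: the grid is rectangular
        push_neg at hlong
        exact segsA_eq_segsB_rect grid (grid.headD []).length
          (fun row hrow => le_antisymm (hlong row hrow) (hmin row hrow)) _ 0

theorem split_by_vertical_divider_changed : Claim_changed_split_by_vertical_divider := by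
  unfold Claim_changed_split_by_vertical_divider; decide

theorem split_by_vertical_divider_tight : Claim_exact_split_by_vertical_divider := by
  unfold Claim_exact_split_by_vertical_divider
  intro grid _ hpre hd
  obtain ⟨hg, hmin⟩ := hpre
  obtain ⟨⟨rowL, hrowL, hlong⟩, ⟨c, hc, hdivp⟩, hlastp⟩ := hd
  have hdivc := (divProp_iff grid hg hmin c hc).mp hdivp
  set n := (grid.headD []).length with hn
  set ds := (List.range n).filter (pvIsDiv grid (get_bg grid)) with hds
  have hdv : ds ≠ [] := by
    intro hnil
    have : c ∈ ds := by rw [hds, List.mem_filter, List.mem_range]; exact ⟨hc, hdivc⟩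
    rw [hnil] at this; simp at this
  have hfp : finalPrev ds 0 < n := by
    have hle : finalPrev ds 0 ≤ n - 1 := by
      apply finalPrev_le
      · intro d hdm
        rw [hds, List.mem_filter, List.mem_range] at hdm
        have hdn : d < n := hdm.1
        have : d ≠ n - 1 := by
          intro he
          rw [he] at hdm
          exact hlastp ((divProp_iff grid hg hmin (n - 1) (by omega)).mpr hdm.2)
        omega
      · omega
    omega
  rw [portA_eq grid hg, portB_eq grid hg hmin, ← hn, ← hds, if_neg hdv, if_neg hdv]
  rw [segsA_eq_parts grid n ds 0, segsB_eq_parts grid n ds 0, if_pos hfp, if_pos hfp]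
  intro heq
  have htail := List.append_cancel_left heq
  simp only [List.cons.injEq] at htail
  have hrow := (List.map_eq_map_iff.mp htail.1) rowL hrowL
  have := congrArg List.length hrow
  rw [PySem.List.slice_from_natCast, PySem.List.slice_natCast] at this
  simp only [List.length_drop, List.length_take] at this
  omega
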